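-- pv_equiv track=rewrite | github.com/radeva/aoc | 2022-1/solution.py | getCaloriesPerElf
-- ===== SOURCE A (Python) =====
-- def getCaloriesPerElf(lines):
--     elfs_calories = []
--     currentElfCalories = 0
--
--     for l in lines:
--         l = l.strip()
--         if len(l) > 0:
--             currentElfCalories += int(l)
--         else:
--             elfs_calories.append(currentElfCalories)
--             currentElfCalories = 0;
--
--     elfs_calories.append(currentElfCalories)
--     elfs_calories.sort(reverse=True)
--
--     return elfs_calories
-- ===== SOURCE B (Python) =====
-- def getCaloriesPerElf(lines):
--     # Build the groups first: split the line list at every blank (stripped-empty)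
--     # line; each blank is its own separator, so consecutive/trailing blanks give
--     # empty groups, and there is always at least one group.
--     groups = [[]]
--     for l in lines:
--         if l.strip():
--             groups[-1].append(l)
--         else:
--             groups.append([])
--     totals = [sum(int(x.strip()) for x in g) for g in groups]
--     totals.sort(reverse=True)
--     return totals
-- ===== Notes on version B (the rewrite author's own statement) =====
-- stated objective: alternative
-- what changed: A fuses grouping, summing and collecting into one accumulator loop; B first partitions the lines into groups at blank lines, then maps each group to its sum, then sorts, a build-groups-then-reduce decomposition.
import Mathlib
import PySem

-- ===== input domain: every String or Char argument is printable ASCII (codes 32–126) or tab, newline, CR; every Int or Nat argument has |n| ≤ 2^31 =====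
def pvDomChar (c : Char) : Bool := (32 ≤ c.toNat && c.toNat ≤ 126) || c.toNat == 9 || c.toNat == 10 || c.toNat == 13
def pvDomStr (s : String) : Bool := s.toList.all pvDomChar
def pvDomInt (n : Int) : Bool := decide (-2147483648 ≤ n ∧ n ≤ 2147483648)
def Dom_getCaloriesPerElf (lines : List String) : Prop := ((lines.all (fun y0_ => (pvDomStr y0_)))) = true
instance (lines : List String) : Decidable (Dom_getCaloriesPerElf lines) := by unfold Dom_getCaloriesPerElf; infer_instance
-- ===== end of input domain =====

-- B partitions the lines into groups at blank lines and then sums each group,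
-- instead of A's fused accumulate-on-blank pass; same cost, different decomposition.

-- ===== PORT A =====
-- A's loop, accumulator style: `cur` is currentElfCalories; the list is built
-- left-to-right (each blank contributes `cur`, the final append gives the last cons).
-- `none` = the ValueError of int(l) on a non-integer non-blank line (excluded by Pre_).
def runA : List String → Int → Option (List Int)
  | [], cur => some [cur]
  | l :: ls, cur =>
    let s := PySem.Str.strip l
    if PySem.Str.len s > 0 then
      match PySem.Int.ofStr? s with
      | some n => runA ls (cur + n)
      | none => none
    else
      (runA ls 0).map (cur :: ·)

def getCaloriesPerElf (lines : List String) : List Int :=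
  match runA lines 0 with
  | some elfs => PySem.List.sorted elfs (fun x => x) true
  | none => []   -- unreachable under Pre_ (int() raised)

-- ===== PORT B =====
-- partition the lines into groups, splitting at every blank line
def splitGroups : List String → List (List String)
  | [] => [[]]
  | l :: ls =>
    if PySem.Str.len (PySem.Str.strip l) > 0 then
      match splitGroups ls with
      | g :: gs => (l :: g) :: gs
      | [] => [[l]]   -- unreachable: splitGroups is never []
    else
      [] :: splitGroups ls

-- sum(int(x.strip()) for x in g), left to right; none = ValueError
def groupSum : List String → Option Int
  | [] => some 0
  | x :: xs =>
    match PySem.Int.ofStr? (PySem.Str.strip x) with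
    | some n => (groupSum xs).map (n + ·)
    | none => none

def totals? : List (List String) → Option (List Int)
  | [] => some []
  | g :: gs =>
    match groupSum g with
    | some t => (totals? gs).map (t :: ·)
    | none => none

def getCaloriesPerElf_alt (lines : List String) : List Int :=
  match totals? (splitGroups lines) with
  | some ts => PySem.List.sorted ts (fun x => x) true
  | none => []   -- unreachable under Pre_ (int() raised)

-- ===== PRECONDITION & SPEC =====
-- Pre_ excludes exactly the inputs on which Python A raises ValueError:
-- a non-blank line whose stripped text is not a Python integer literal.
def Pre_getCaloriesPerElf (lines : List String) : Prop :=
  ∀ l ∈ lines, PySem.Str.len (PySem.Str.strip l) > 0 →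
    (PySem.Int.ofStr? (PySem.Str.strip l)).isSome = true
instance (lines : List String) : Decidable (Pre_getCaloriesPerElf lines) := by
  unfold Pre_getCaloriesPerElf; infer_instance

def pvWitness_getCaloriesPerElf : List String := ["12", "", "3"]

def Spec_getCaloriesPerElf (lines : List String) (out : List Int) : Prop := out = getCaloriesPerElf_alt lines
instance (lines : List String) (out : List Int) : Decidable (Spec_getCaloriesPerElf lines out) := by unfold Spec_getCaloriesPerElf; infer_instance

-- ===== CLAIM (what is proved, stated in full; the proofs are below) =====
def Claim_equal_getCaloriesPerElf : Prop := ∀ (lines : List String), Dom_getCaloriesPerElf lines → Pre_getCaloriesPerElf lines → Spec_getCaloriesPerElf lines (getCaloriesPerElf lines)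

-- ===== LEMMAS AND PROOFS =====

theorem splitGroups_ne_nil : ∀ (ls : List String), splitGroups ls ≠ []
  | [] => by simp [splitGroups]
  | l :: ls => by
    simp only [splitGroups]
    split
    · split <;> simp
    · simp

-- the pre-sort lists agree: A's fold with pending accumulator `cur` equals
-- B's per-group totals with `cur` added to the head total
theorem runA_eq_totals (lines : List String) (cur : Int) :
    runA lines cur =
      (totals? (splitGroups lines)).map
        (fun ts => match ts with | t :: rest => (cur + t) :: rest | [] => []) := by
  induction lines generalizing cur with
  | nil => simp [runA, splitGroups, totals?, groupSum]
  | cons l ls ih =>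
    simp only [runA, splitGroups]
    by_cases hlen : PySem.Str.len (PySem.Str.strip l) > 0
    · simp only [hlen, if_pos]
      cases hi : PySem.Int.ofStr? (PySem.Str.strip l) with
      | none =>
        cases hg : splitGroups ls with
        | nil => simp [totals?, groupSum, hi]
        | cons g gs => simp [totals?, groupSum, hi]
      | some n =>
        simp only []
        rw [ih]
        cases hg : splitGroups ls with
        | nil => exact absurd hg (splitGroups_ne_nil ls)
        | cons g gs =>
          simp only [totals?, groupSum, hi]
          cases hs : groupSum g with
          | none => simp
          | some t =>
            cases ht : totals? gs with
            | none => simp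
            | some rest => simp [Option.map]; ring_nf
    · simp only [hlen, if_neg, not_false_iff]
      rw [ih]
      cases ht : totals? (splitGroups ls) with
      | none => simp [totals?, groupSum, ht]
      | some rest =>
        simp only [totals?, groupSum, ht, Option.map]
        cases rest with
        | nil => simp
        | cons t r => simp

-- ===== VERDICT (by name: the statement is the Claim_ definition above) =====
theorem getCaloriesPerElf_spec : Claim_equal_getCaloriesPerElf := by
  intro lines _ _
  unfold Spec_getCaloriesPerElf getCaloriesPerElf getCaloriesPerElf_alt
  rw [runA_eq_totals]
  cases ht : totals? (splitGroups lines) with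
  | none => simp
  | some ts =>
    cases ts with
    | nil => simp
    | cons t rest => simp
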